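-- pv_equiv track=rewrite | github.com/dubielel/computational-intelligence-in-digital-data-analysis | lab2/heuristic.py | _calculate_columns
-- ===== SOURCE A (Python) =====
-- from typing import Dict, List
--
-- def _calculate_columns(goal) -> Dict[str, int]:
--     unique_blocks = set()
--     for k, v in goal.items():
--         if v != 'table':
--             unique_blocks.add(v)
--         if k[0] != 'table':
--             unique_blocks.add(k[0])
--
--
--     goal = {k[0]: v for k, v in goal.items()}
--
--     result = dict()
--     for block in unique_blocks:
--         curr = block
--         deepness = 0
--
--         while curr in goal and goal[curr] != 'table':
--             curr = goal[curr]
--             deepness += 1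
--
--         result[block] = deepness
--
--     return result
-- ===== SOURCE B (Python) =====
-- def _calculate_columns(goal):
--     parent = {k[0]: v for k, v in goal.items()}
--     blocks = set()
--     for k, v in goal.items():
--         if v != 'table':
--             blocks.add(v)
--         if k[0] != 'table':
--             blocks.add(k[0])
--     depth = {}
--     result = {}
--     for b in blocks:
--         path = []
--         curr = b
--         while curr not in depth and curr in parent and parent[curr] != 'table':
--             path.append(curr)
--             curr = parent[curr]
--         if curr not in depth:
--             depth[curr] = 0
--         d = depth[curr]
--         while path:
--             d += 1
--             depth[path.pop()] = d
--         result[b] = depth[b] if b in depth else 0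
--     return result
-- ===== Notes on version B (the rewrite author's own statement) =====
-- stated objective: alternative
-- what changed: B replaces A's independent chain walk per block by a memoized traversal: it caches each node's chain depth and, per block, walks only until a cached or terminal node, then assigns depths back along the collected path, so each chain edge is resolved once (A re-walks whole chains; no measured speed difference on the generated inputs, whose chains are short).
import Mathlib
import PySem

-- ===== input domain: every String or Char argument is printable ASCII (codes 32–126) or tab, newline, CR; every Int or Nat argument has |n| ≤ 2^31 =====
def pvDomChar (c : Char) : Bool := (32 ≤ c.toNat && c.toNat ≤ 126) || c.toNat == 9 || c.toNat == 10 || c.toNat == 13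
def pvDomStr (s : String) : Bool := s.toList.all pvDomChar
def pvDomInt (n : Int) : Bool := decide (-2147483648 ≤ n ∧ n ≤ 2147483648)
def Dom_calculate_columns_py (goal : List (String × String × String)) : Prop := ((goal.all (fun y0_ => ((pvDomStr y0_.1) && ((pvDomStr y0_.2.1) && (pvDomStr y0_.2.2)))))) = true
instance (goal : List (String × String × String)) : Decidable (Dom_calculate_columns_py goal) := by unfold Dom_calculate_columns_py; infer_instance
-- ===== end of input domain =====

-- Alternative algorithm: B caches each node's chain depth and reuses it across blocks instead of
-- re-walking every chain from scratch per block; equivalence is proved on all acyclic inputs.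


-- ===== PORT A =====
-- shared helpers: both Pythons build the same unique_blocks set and the same {k[0]: v} dict
def pvBlocks (goal : List (String × String × String)) : PySem.Set String :=
  goal.foldl (fun s e =>
    let s1 := if e.2.2 ≠ "table" then PySem.Set.add s e.2.2 else s
    if e.1 ≠ "table" then PySem.Set.add s1 e.1 else s1) PySem.Set.empty

def pvParent (goal : List (String × String × String)) : PySem.Dict String String :=
  goal.foldl (fun d e => d.insert e.1 e.2.2) PySem.Dict.empty

-- A's while loop; the fuel only makes it total (under Pre_ the chain stops within d.size steps)
def pvChainA (d : PySem.Dict String String) (curr : String) (deep : Int) : Nat → Int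
  | 0 => deep
  | f+1 =>
    match d.get? curr with
    | none => deep
    | some v => if v = "table" then deep else pvChainA d v (deep+1) f

def calculate_columns_py (goal : List (String × String × String)) : List (String × Int) :=
  ((pvBlocks goal).foldl
    (fun r b => r.insert b (pvChainA (pvParent goal) b 0 ((pvParent goal).size + 1)))
    PySem.Dict.empty).items

-- ===== PORT B =====
-- B's inner while loop: walk the chain, collecting uncached nodes, until a cached or terminal node
def pvCollect (p : PySem.Dict String String) (dep : PySem.Dict String Int) :
    String → List String → Nat → List String × String
  | curr, path, 0 => (path, curr)
  | curr, path, f+1 =>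
    if dep.contains curr then (path, curr)
    else match p.get? curr with
      | none => (path, curr)
      | some v => if v = "table" then (path, curr) else pvCollect p dep v (path ++ [curr]) f

-- B's loop body for one block: collect, seed the stop node, unwind the path back-to-front
def pvStep (p : PySem.Dict String String)
    (st : PySem.Dict String Int × PySem.Dict String Int) (b : String) :
    PySem.Dict String Int × PySem.Dict String Int :=
  let pc := pvCollect p st.1 b [] (p.size + 1)
  let dep0 := if st.1.contains pc.2 then st.1 else st.1.insert pc.2 0
  let d0 := dep0.getD pc.2 0
  let un := pc.1.reverse.foldl
    (fun (s : Int × PySem.Dict String Int) x => (s.1 + 1, s.2.insert x (s.1 + 1))) (d0, dep0)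
  (un.2, st.2.insert b (if un.2.contains b then un.2.getD b 0 else 0))

def calculate_columns_py_alt (goal : List (String × String × String)) : List (String × Int) :=
  ((pvBlocks goal).foldl (pvStep (pvParent goal)) (PySem.Dict.empty, PySem.Dict.empty)).2.items

-- ===== PRECONDITION & SPEC =====
-- a node is terminal for the chain walk: not a key, or mapped to 'table'
def pvTerm (d : PySem.Dict String String) (x : String) : Bool :=
  match d.get? x with
  | none => true
  | some v => v == "table"

-- the chain from x reaches a terminal node within n steps
def pvEsc (d : PySem.Dict String String) : String → Nat → Bool
  | x, 0 => pvTerm d x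
  | x, n+1 => pvTerm d x || (match d.get? x with | none => true | some v => pvEsc d v n)

-- Pre_ excludes exactly the inputs whose block chains form a cycle: there Python A's while loop
-- never terminates (A returns nothing), so nothing is claimed about them.
def Pre_calculate_columns_py (goal : List (String × String × String)) : Prop :=
  ∀ k ∈ (pvParent goal).keys, pvEsc (pvParent goal) k (pvParent goal).size = true

instance (goal : List (String × String × String)) : Decidable (Pre_calculate_columns_py goal) := by
  unfold Pre_calculate_columns_py; infer_instance

def pvWitness_calculate_columns_py : (List (String × String × String)) :=
  [("a", "x", "b"), ("b", "y", "table"), ("c", "z", "a")]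

def Spec_calculate_columns_py (goal : List (String × String × String)) (out : List (String × Int)) : Prop := out = calculate_columns_py_alt goal
instance (goal : List (String × String × String)) (out : List (String × Int)) : Decidable (Spec_calculate_columns_py goal out) := by unfold Spec_calculate_columns_py; infer_instance

-- ===== CLAIM (what is proved, stated in full; the proofs are below) =====
def Claim_equal_calculate_columns_py : Prop := ∀ (goal : List (String × String × String)), Dom_calculate_columns_py goal → Pre_calculate_columns_py goal → Spec_calculate_columns_py goal (calculate_columns_py goal)

-- ===== LEMMAS AND PROOFS =====

-- the depth of x: steps along the chain until a terminal node (the common value both ports compute)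
def pvPd (d : PySem.Dict String String) : String → Nat → Int
  | _, 0 => 0
  | x, f+1 =>
    match d.get? x with
    | none => 0
    | some v => if v = "table" then 0 else 1 + pvPd d v f

-- the cache invariant: every cached depth is the true depth
def pvInv (d : PySem.Dict String String) (dep : PySem.Dict String Int) : Prop :=
  ∀ k v, dep.get? k = some v → v = pvPd d k (d.size + 1)

theorem pvPd_term (d : PySem.Dict String String) (x : String) (h : pvTerm d x = true) :
    ∀ f, pvPd d x f = 0 := by
  intro f
  cases f with
  | zero => rfl
  | succ f =>
    unfold pvTerm at h
    unfold pvPd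
    cases hg : d.get? x with
    | none => rfl
    | some v =>
      rw [hg] at h
      show (if v = "table" then 0 else 1 + pvPd d v f) = 0
      have h' : (v == "table") = true := h
      rw [if_pos (beq_iff_eq.mp h')]

theorem pvEsc_term (d : PySem.Dict String String) (x : String) (h : pvTerm d x = true) :
    ∀ n, pvEsc d x n = true := by
  intro n; cases n with
  | zero => exact h
  | succ n => unfold pvEsc; simp [h]

theorem pvEsc_succ (d : PySem.Dict String String) :
    ∀ n x, pvEsc d x n = true → pvEsc d x (n+1) = true := by
  intro n
  induction n with
  | zero => intro x h; exact pvEsc_term d x h 1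
  | succ n ih =>
    intro x h
    unfold pvEsc at h ⊢
    rcases Bool.or_eq_true_iff.mp h with h1 | h2
    · simp [h1]
    · cases hg : d.get? x with
      | none => simp
      | some v =>
        simp only [hg] at h2 ⊢
        simp [ih v h2]

theorem pvPd_stab (d : PySem.Dict String String) :
    ∀ n x f g, pvEsc d x n = true → n ≤ f → n ≤ g → pvPd d x f = pvPd d x g := by
  intro n
  induction n with
  | zero => intro x f g h _ _; rw [pvPd_term d x h, pvPd_term d x h]
  | succ n ih =>
    intro x f g h hf hg
    by_cases ht : pvTerm d x = true
    · rw [pvPd_term d x ht, pvPd_term d x ht]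
    · unfold pvEsc at h
      rcases Bool.or_eq_true_iff.mp h with h1 | h2
      · exact absurd h1 ht
      · unfold pvTerm at ht
        cases hgx : d.get? x with
        | none => simp [hgx] at ht
        | some v =>
          simp only [hgx] at h2 ht
          have hv : v ≠ "table" := by simpa using ht
          obtain ⟨f', rfl⟩ : ∃ f', f = f' + 1 := ⟨f - 1, by omega⟩
          obtain ⟨g', rfl⟩ : ∃ g', g = g' + 1 := ⟨g - 1, by omega⟩
          unfold pvPd
          simp only [hgx, if_neg hv]
          rw [ih v f' g' h2 (by omega) (by omega)]

theorem pvChainA_pd (d : PySem.Dict String String) :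
    ∀ f x deep, pvChainA d x deep f = deep + pvPd d x f := by
  intro f
  induction f with
  | zero => intro x deep; simp [pvChainA, pvPd]
  | succ f ih =>
    intro x deep
    unfold pvChainA pvPd
    cases hg : d.get? x with
    | none => simp
    | some v =>
      by_cases hv : v = "table"
      · simp [hv]
      · simp only [if_neg hv]
        rw [ih v (deep + 1)]
        ring

theorem pvCollect_acc (p : PySem.Dict String String) (dep : PySem.Dict String Int) :
    ∀ f curr path, pvCollect p dep curr path f =
      (path ++ (pvCollect p dep curr [] f).1, (pvCollect p dep curr [] f).2) := by
  intro f
  induction f with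
  | zero => intro curr path; simp [pvCollect]
  | succ f ih =>
    intro curr path
    unfold pvCollect
    by_cases hc : dep.contains curr
    · simp [hc]
    · simp only [hc, Bool.false_eq_true, if_false]
      cases hg : p.get? curr with
      | none => simp
      | some v =>
        by_cases hv : v = "table"
        · simp [hv]
        · simp only [if_neg hv, List.nil_append]
          rw [ih v (path ++ [curr]), ih v [curr]]
          simp

-- the collect-then-unwind pipeline of pvStep, as one named function (definitionally pvStep's work)
def pvUn (d : PySem.Dict String String) (dep : PySem.Dict String Int) (curr : String) (f : Nat) :
    Int × PySem.Dict String Int :=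
  let pc := pvCollect d dep curr [] f
  let dep0 := if dep.contains pc.2 then dep else dep.insert pc.2 0
  pc.1.reverse.foldl
    (fun (s : Int × PySem.Dict String Int) x => (s.1 + 1, s.2.insert x (s.1 + 1)))
    (dep0.getD pc.2 0, dep0)

theorem pvCollect_stop (p : PySem.Dict String String) (dep : PySem.Dict String Int)
    (curr : String) (path : List String) (f : Nat)
    (h : dep.contains curr = true ∨ pvTerm p curr = true) :
    pvCollect p dep curr path f = (path, curr) := by
  cases f with
  | zero => rfl
  | succ f =>
    unfold pvCollect
    rcases h with h | h
    · simp [h]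
    · by_cases hc : dep.contains curr
      · simp [hc]
      · simp only [hc, Bool.false_eq_true, if_false]
        unfold pvTerm at h
        cases hg : p.get? curr with
        | none => simp
        | some v =>
          simp only [hg] at h
          simp [beq_iff_eq.mp h]

-- stop node: cached or terminal — pvUn returns its depth and leaves the invariant intact
theorem pvMain_stop (d : PySem.Dict String String) (dep : PySem.Dict String Int) (curr : String)
    (f : Nat) (hInv : pvInv d dep)
    (hstop : dep.contains curr = true ∨ pvTerm d curr = true) :
    pvInv d (pvUn d dep curr f).2 ∧
      (pvUn d dep curr f).2.get? curr = some (pvPd d curr (d.size + 1)) ∧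
      (pvUn d dep curr f).1 = pvPd d curr (d.size + 1) := by
  have hpc := pvCollect_stop d dep curr [] f hstop
  rcases hc : dep.contains curr with hc' | hc'
  · -- not cached: terminal
    have ht : pvTerm d curr = true := by
      rcases hstop with h | h
      · rw [hc] at h; exact absurd h (by simp)
      · exact h
    have hun : pvUn d dep curr f = ((dep.insert curr 0).getD curr 0, dep.insert curr 0) := by
      unfold pvUn
      rw [hpc]
      simp [hc]
    have hgd : (dep.insert curr 0).getD curr 0 = 0 := by
      rw [PySem.Dict.getD_eq_get?_getD, PySem.Dict.get?_insert_self]; rfl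
    have hpd : pvPd d curr (d.size + 1) = 0 := pvPd_term d curr ht _
    refine ⟨?_, ?_, ?_⟩
    · rw [hun]
      intro k v hkv
      rw [PySem.Dict.get?_insert] at hkv
      by_cases hk : k = curr
      · simp [hk] at hkv; rw [← hkv, hk, hpd]
      · rw [if_neg hk] at hkv; exact hInv k v hkv
    · rw [hun]; simpa [PySem.Dict.get?_insert_self] using hpd.symm
    · rw [hun, hgd, hpd]
  · -- cached
    have hun : pvUn d dep curr f = (dep.getD curr 0, dep) := by
      unfold pvUn
      rw [hpc]
      simp [hc]
    obtain ⟨v, hv⟩ := Option.isSome_iff_exists.mp (by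
      rw [← PySem.Dict.contains_eq_isSome_get?, hc] : (dep.get? curr).isSome = true)
    have hval : v = pvPd d curr (d.size + 1) := hInv curr v hv
    refine ⟨?_, ?_, ?_⟩
    · rw [hun]; exact hInv
    · rw [hun, hv, hval]
    · rw [hun, PySem.Dict.getD_eq_get?_getD, hv, hval]; rfl

-- collect-then-unwind computes the true depth of the start node and preserves the cache invariant
theorem pvMain (d : PySem.Dict String String) :
    ∀ n curr f dep, pvInv d dep → pvEsc d curr n = true → n ≤ f → n ≤ d.size + 1 →
      pvInv (d := d) (pvUn d dep curr f).2 ∧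
        (pvUn d dep curr f).2.get? curr = some (pvPd d curr (d.size + 1)) ∧
        (pvUn d dep curr f).1 = pvPd d curr (d.size + 1) := by
  intro n
  induction n with
  | zero =>
    intro curr f dep hInv hr _ _
    exact pvMain_stop d dep curr f hInv (Or.inr hr)
  | succ n ih =>
    intro curr f dep hInv hr hf hN
    by_cases hc : dep.contains curr = true
    · exact pvMain_stop d dep curr f hInv (Or.inl hc)
    · by_cases ht : pvTerm d curr = true
      · exact pvMain_stop d dep curr f hInv (Or.inr ht)
      · -- one real step along the chain
        unfold pvTerm at ht
        cases hg : d.get? curr with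
        | none => rw [hg] at ht; exact absurd rfl ht
        | some v =>
          rw [hg] at ht
          have hv : v ≠ "table" := fun h => ht (by simp [h])
          have hrv : pvEsc d v n = true := by
            unfold pvEsc at hr
            rcases Bool.or_eq_true_iff.mp hr with h | h
            · exact absurd h (by unfold pvTerm; rw [hg]; simpa using ht)
            · rw [hg] at h; exact h
          obtain ⟨f', rfl⟩ : ∃ f', f = f' + 1 := ⟨f - 1, by omega⟩
          -- unfold one collect step
          have hcol : pvCollect d dep curr [] (f' + 1) =
              (curr :: (pvCollect d dep v [] f').1, (pvCollect d dep v [] f').2) := by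
            have h0 : pvCollect d dep curr [] (f' + 1) = pvCollect d dep v [curr] f' := by
              unfold pvCollect
              simp [hc, hg, hv]
              cases f' <;> rfl
            rw [h0, pvCollect_acc d dep f' v [curr]]
            simp
          obtain ⟨ihInv, ihGet, ihVal⟩ :=
            ih v f' dep hInv hrv (by omega) (by omega)
          have hun : pvUn d dep curr (f' + 1) =
              ((pvUn d dep v f').1 + 1,
               (pvUn d dep v f').2.insert curr ((pvUn d dep v f').1 + 1)) := by
            unfold pvUn
            rw [hcol]
            simp only [List.reverse_cons, List.foldl_append, List.foldl_cons, List.foldl_nil]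
          have hpd : pvPd d curr (d.size + 1) = pvPd d v (d.size + 1) + 1 := by
            have hsz : pvPd d v d.size = pvPd d v (d.size + 1) :=
              pvPd_stab d n v d.size (d.size + 1) hrv (by omega) (by omega)
            rw [← hsz]
            unfold pvPd
            simp only [hg, if_neg hv]
            rw [Int.add_comm]
            conv_lhs => rw [pvPd.eq_def]
          refine ⟨?_, ?_, ?_⟩
          · rw [hun]
            intro k w hkw
            rw [PySem.Dict.get?_insert] at hkw
            by_cases hk : k = curr
            · rw [if_pos hk] at hkw
              cases hkw
              rw [hk, hpd, ihVal]
            · rw [if_neg hk] at hkw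
              exact ihInv k w hkw
          · rw [hun]
            simp only [PySem.Dict.get?_insert_self]
            rw [hpd, ihVal]
          · rw [hun, ihVal, hpd]

theorem pvStep_eq (d : PySem.Dict String String)
    (hT : ∀ x, pvEsc d x (d.size + 1) = true)
    (dep res : PySem.Dict String Int) (hInv : pvInv d dep) (b : String) :
    (pvStep d (dep, res) b).2 = res.insert b (pvPd d b (d.size + 1)) ∧
      pvInv d (pvStep d (dep, res) b).1 := by
  obtain ⟨hInv', hGet, _⟩ :=
    pvMain d (d.size + 1) b (d.size + 1) dep hInv (hT b) le_rfl le_rfl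
  have h1 : (pvStep d (dep, res) b).1 = (pvUn d dep b (d.size + 1)).2 := rfl
  have h2 : (pvStep d (dep, res) b).2 =
      res.insert b (if (pvUn d dep b (d.size + 1)).2.contains b
        then (pvUn d dep b (d.size + 1)).2.getD b 0 else 0) := rfl
  have hcb : (pvUn d dep b (d.size + 1)).2.contains b = true := by
    rw [PySem.Dict.contains_eq_isSome_get?, hGet]; rfl
  have hgd : (pvUn d dep b (d.size + 1)).2.getD b 0 = pvPd d b (d.size + 1) := by
    rw [PySem.Dict.getD_eq_get?_getD, hGet]; rfl
  constructor
  · rw [h2, hcb, if_pos rfl, hgd]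
  · rw [h1]; exact hInv'

theorem pvFold_eq (d : PySem.Dict String String)
    (hT : ∀ x, pvEsc d x (d.size + 1) = true) :
    ∀ (bs : List String) (res : PySem.Dict String Int) (dep : PySem.Dict String Int),
      pvInv d dep →
      (bs.foldl (pvStep d) (dep, res)).2 =
        bs.foldl (fun r b => r.insert b (pvChainA d b 0 (d.size + 1))) res := by
  intro bs
  induction bs with
  | nil => intro res dep _; rfl
  | cons b bs ih =>
    intro res dep hInv
    simp only [List.foldl_cons]
    obtain ⟨h2, hInv'⟩ := pvStep_eq d hT dep res hInv b
    have hpair : pvStep d (dep, res) b =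
        ((pvStep d (dep, res) b).1, res.insert b (pvPd d b (d.size + 1))) := by
      rw [← h2]
    rw [hpair, ih _ _ hInv', pvChainA_pd d (d.size + 1) b 0, zero_add]

theorem pvGlobal (d : PySem.Dict String String)
    (hpre : ∀ k ∈ d.keys, pvEsc d k d.size = true) :
    ∀ x, pvEsc d x (d.size + 1) = true := by
  intro x
  cases hg : d.get? x with
  | none => exact pvEsc_term d x (by simp [pvTerm, hg]) _
  | some v =>
    have hk : x ∈ d.keys := by
      have hc : d.contains x = true := by
        rw [PySem.Dict.contains_eq_isSome_get?, hg]; rfl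
      exact (PySem.Dict.contains_iff_mem_keys d x).mp hc
    exact pvEsc_succ d _ x (hpre x hk)

-- ===== VERDICT (by name: the statement is the Claim_ definition above) =====
theorem calculate_columns_py_spec : Claim_equal_calculate_columns_py := by
  intro goal _ hpre
  unfold Spec_calculate_columns_py calculate_columns_py calculate_columns_py_alt
  have hT := pvGlobal (pvParent goal) hpre
  rw [pvFold_eq (pvParent goal) hT (pvBlocks goal) PySem.Dict.empty PySem.Dict.empty
    (by intro k v h; simp [PySem.Dict.get?_empty] at h)]
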